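-- pv_equiv track=rewrite | github.com/AdryanMoran1997/Escuela | calidad y pruebaas/calidad/dft-KevinBR117-main/dft-KevinBR117-main/estados.py | anomalia
-- ===== SOURCE A (Python) =====
-- def anomalia(lista_estados):
--     boolean = True
--     for i in range (len(lista_estados)):
--         if lista_estados[i] == 'u':
--             if (i+1) < len(lista_estados):#verificar si quedan elementos antes de avanzar
--                 if lista_estados[i+1] == 'r':
--                     boolean = False
--         elif lista_estados[i] == 'd':
--             if (i+1) < len(lista_estados):
--                 if (lista_estados[i+1] == 'd' or lista_estados[i+1] == 'u'):
--                     boolean = False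
--         else:#estamos en el estado referenciado
--             boolean = True
--     return boolean
-- ===== SOURCE B (Python) =====
-- def anomalia(lista_estados):
--     n = len(lista_estados)
--     for i in range(n - 1, -1, -1):
--         e = lista_estados[i]
--         if e != 'u' and e != 'd':
--             return True
--         nxt = lista_estados[i + 1] if i + 1 < n else None
--         if e == 'u':
--             if nxt == 'r':
--                 return False
--         else:
--             if nxt == 'd' or nxt == 'u':
--                 return False
--     return True
-- ===== Notes on version B (the rewrite author's own statement) =====
-- stated objective: alternative
-- what changed: Replaces A's forward overwrite-last-wins loop by a backwards scan that returns at the first decisive index (a non-'u'/'d' element, or a 'u'/'d' whose successor triggers the anomaly rule), defaulting to True when no index is decisive.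
import Mathlib
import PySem

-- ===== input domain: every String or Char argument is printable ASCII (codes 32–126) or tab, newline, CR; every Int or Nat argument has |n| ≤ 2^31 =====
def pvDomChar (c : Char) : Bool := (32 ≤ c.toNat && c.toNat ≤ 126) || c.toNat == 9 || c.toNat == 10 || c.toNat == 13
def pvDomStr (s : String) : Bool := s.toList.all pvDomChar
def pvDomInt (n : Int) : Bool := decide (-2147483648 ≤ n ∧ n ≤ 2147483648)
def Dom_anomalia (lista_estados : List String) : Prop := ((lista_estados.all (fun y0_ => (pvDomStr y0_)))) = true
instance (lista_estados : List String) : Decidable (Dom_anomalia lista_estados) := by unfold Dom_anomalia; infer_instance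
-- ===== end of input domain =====

-- B replaces A's forward overwrite-last-wins loop by a backwards early-exit scan (first decisive index from the right decides); objective: alternative decomposition, same cost.

-- ===== PORT A =====
-- forward loop over range(len(lista_estados)); boolean is overwritten exactly as in the Python
def anomalia (lista_estados : List String) : Bool :=
  (List.range lista_estados.length).foldl (fun boolean i =>
    if lista_estados.getD i "" = "u" then
      if i + 1 < lista_estados.length then
        if lista_estados.getD (i+1) "" = "r" then false else boolean
      else boolean
    else if lista_estados.getD i "" = "d" then
      if i + 1 < lista_estados.length then
        if lista_estados.getD (i+1) "" = "d" ∨ lista_estados.getD (i+1) "" = "u" then false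
        else boolean
      else boolean
    else true) true

-- ===== PORT B =====
-- backwards scan over the indices (range(n-1,-1,-1) = reversed range): return at the first decisive index, true if none
def anomaliaAltLoop (xs : List String) : List Nat → Bool
  | [] => true
  | i :: rest =>
    let e := xs.getD i ""
    if e ≠ "u" ∧ e ≠ "d" then true
    else
      let nxt : Option String := if i + 1 < xs.length then some (xs.getD (i+1) "") else none
      if e = "u" then
        if nxt = some "r" then false else anomaliaAltLoop xs rest
      else
        if nxt = some "d" ∨ nxt = some "u" then false else anomaliaAltLoop xs rest

def anomalia_alt (lista_estados : List String) : Bool :=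
  anomaliaAltLoop lista_estados (List.range lista_estados.length).reverse

-- ===== PRECONDITION & SPEC =====
def Spec_anomalia (lista_estados : List String) (out : Bool) : Prop := out = anomalia_alt lista_estados
instance (lista_estados : List String) (out : Bool) : Decidable (Spec_anomalia lista_estados out) := by unfold Spec_anomalia; infer_instance

-- ===== CLAIM (what is proved, stated in full; the proofs are below) =====
def Claim_equal_anomalia : Prop := ∀ (lista_estados : List String), Dom_anomalia lista_estados → Spec_anomalia lista_estados (anomalia lista_estados)

-- ===== LEMMAS AND PROOFS =====

-- the decision index i makes (some v = it assigns v to boolean; none = it leaves boolean unchanged)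
def pvDec (xs : List String) (i : Nat) : Option Bool :=
  let e := xs.getD i ""
  if e = "u" then
    if i + 1 < xs.length ∧ xs.getD (i+1) "" = "r" then some false else none
  else if e = "d" then
    if i + 1 < xs.length ∧ (xs.getD (i+1) "" = "d" ∨ xs.getD (i+1) "" = "u") then some false else none
  else some true

def pvLast (xs : List String) (l : List Nat) : Option Bool :=
  l.foldl (fun a i => match pvDec xs i with | some v => some v | none => a) none

theorem pvLast_shift (xs : List String) (l : List Nat) (a : Option Bool) (b : Bool) :
    (l.foldl (fun a i => match pvDec xs i with | some v => some v | none => a) a).getD b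
      = (pvLast xs l).getD (a.getD b) := by
  induction l generalizing a b with
  | nil => simp [pvLast]
  | cons i l ih =>
    simp only [pvLast, List.foldl_cons] at *
    cases h : pvDec xs i with
    | some v =>
      simp only [h]
      conv_rhs => rw [ih (some v) (a.getD b)]
      rw [ih (some v) b]
      simp
    | none =>
      simp only [h]
      rw [ih a b]

theorem anomalia_foldl_eq (xs : List String) (l : List Nat) (b : Bool) :
    l.foldl (fun boolean i =>
      if xs.getD i "" = "u" then
        if i + 1 < xs.length then
          if xs.getD (i+1) "" = "r" then false else boolean
        else boolean
      else if xs.getD i "" = "d" then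
        if i + 1 < xs.length then
          if xs.getD (i+1) "" = "d" ∨ xs.getD (i+1) "" = "u" then false
          else boolean
        else boolean
      else true) b = (pvLast xs l).getD b := by
  induction l generalizing b with
  | nil => simp [pvLast]
  | cons i l ih =>
    simp only [List.foldl_cons]
    rw [ih]
    have h2 : pvLast xs (i :: l)
        = l.foldl (fun a j => match pvDec xs j with | some v => some v | none => a)
            (match pvDec xs i with | some v => some v | none => none) := by
      simp [pvLast]
    rw [h2, pvLast_shift]
    congr 1
    simp only [pvDec]
    split_ifs <;> first | rfl | (exfalso; tauto)

theorem altLoop_eq (xs : List String) (r : List Nat) :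
    anomaliaAltLoop xs r = (pvLast xs r.reverse).getD true := by
  induction r with
  | nil => simp [anomaliaAltLoop, pvLast]
  | cons i rest ih =>
    have hfold : pvLast xs ((i :: rest).reverse)
        = match pvDec xs i with | some v => some v | none => pvLast xs rest.reverse := by
      simp [pvLast, List.reverse_cons, List.foldl_append]
    rw [hfold]
    simp only [anomaliaAltLoop, pvDec]
    by_cases hl : i + 1 < xs.length <;>
      simp only [hl, if_pos, if_neg] <;>
      split_ifs <;> simp_all

-- ===== VERDICT (by name: the statement is the Claim_ definition above) =====
theorem anomalia_spec : Claim_equal_anomalia := by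
  intro xs _
  unfold Spec_anomalia anomalia anomalia_alt
  rw [anomalia_foldl_eq, altLoop_eq, List.reverse_reverse]
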